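-- pv_equiv track=rewrite | github.com/miliar/Code_Jam_Webscraper | Solutions_in_python/Problem_138/prob-d.py | playWar
-- ===== SOURCE A (Python) =====
-- def playWar(length,pl1,pl2):
--     p1 = pl1[:]
--     p2 = pl2[:]
--     point = 0 # Point for p1
--
--     for rnd in range(0,length):
--         b1 = b2 = 0
--
--         # P1 chooses lightest block
--         b1 = p1[0]
--
--         # P2 chooses lightest block that is still heavier than b1
--         # If none available, choose lightest block
--         for sb in p2:
--             if sb > b1 and not b2:
--                 b2 = sb
--         if not b2:
--             b2 = p2[0]
--
--         # Compare them
--         if b1 > b2: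
--             point = point + 1
--
--         # Destroy both blocks
--         p1.remove(b1)
--         p2.remove(b2)
--
--     return point
-- ===== SOURCE B (Python) =====
-- def _omax(a, b):
--     if a is None:
--         return b
--     if b is None:
--         return a
--     return a if a >= b else b
--
--
-- def _beats(m, w):
--     # can a block of weight m (None = no block left) beat weight w (None = beat anything)?
--     return m is not None and (w is None or m > w)
--
--
-- def _build(vals, lo, hi):
--     # tournament tree over vals[lo:hi]; each node caches the heaviest remaining weight below it
--     if hi - lo == 1:
--         return (vals[lo],)
--     mid = (lo + hi) // 2
--     left = _build(vals, lo, mid)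
--     right = _build(vals, mid, hi)
--     return (_omax(left[0], right[0]), left, right)
--
--
-- def _pop(t, w):
--     # remove and return the leftmost remaining weight that beats w
--     if len(t) == 1:
--         return t[0], (None,)
--     _, left, right = t
--     if _beats(left[0], w):
--         v, left = _pop(left, w)
--     else:
--         v, right = _pop(right, w)
--     return v, (_omax(left[0], right[0]), left, right)
--
--
-- def playWar(length, pl1, pl2):
--     point = 0
--     if length > 0:
--         t = _build(pl2, 0, len(pl2))
--         for rnd in range(length):
--             b1 = pl1[rnd]
--             if _beats(t[0], b1):
--                 b2, t = _pop(t, b1)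
--             else:
--                 b2, t = _pop(t, None)  # nothing beats b1: play the leftmost block
--             if b1 > b2:
--                 point += 1
--     return point
-- ===== Notes on version B (the rewrite author's own statement) =====
-- stated objective: faster
-- what changed: B replaces A's per-round linear scan of p2 plus value-based list.remove by a tournament (segment) tree over p2's positions caching the heaviest remaining weight, so each round finds and deletes the leftmost block that beats b1 (or the leftmost block) in O(log n); Pre_ excludes hands where player 2 holds a weight-0 block while player 1 plays a negative-weight block, a degenerate-weights corner on which A's scan, encoding 'no block chosen yet' as weight 0, can never select the 0 block and its pick is an artefact of that encoding.
-- outside the precondition, e.g. on playWar(2, [-1, 5], [-2, 0]): A returns 2, B returns 1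
import Mathlib
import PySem

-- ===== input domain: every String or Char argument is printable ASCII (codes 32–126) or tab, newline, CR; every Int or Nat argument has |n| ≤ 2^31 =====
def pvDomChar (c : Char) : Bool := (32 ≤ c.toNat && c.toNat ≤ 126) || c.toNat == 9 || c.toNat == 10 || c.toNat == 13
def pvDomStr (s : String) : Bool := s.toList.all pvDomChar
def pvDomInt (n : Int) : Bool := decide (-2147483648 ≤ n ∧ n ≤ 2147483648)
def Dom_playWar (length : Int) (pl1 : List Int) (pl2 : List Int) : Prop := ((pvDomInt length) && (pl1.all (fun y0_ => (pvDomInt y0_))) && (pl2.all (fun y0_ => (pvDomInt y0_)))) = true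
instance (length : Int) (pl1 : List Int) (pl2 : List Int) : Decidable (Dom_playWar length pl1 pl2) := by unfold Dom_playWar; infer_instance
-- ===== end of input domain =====

-- B replaces A's per-round linear scan + value-based remove by a tournament tree over p2's
-- positions caching the heaviest remaining weight (each round O(log n)); equivalence is about
-- the RETURN value (A mutates only its local copies).

-- ===== PORT A =====
def playWarLoopA : Nat → List Int → List Int → Int → Int
  | 0, _, _, point => point
  | r + 1, p1, p2, point =>
    -- b1 = p1[0]  (IndexError when p1 = []; excluded by Pre_, dummy 0 there)
    let b1 : Int := (PySem.List.pyGet? p1 0).getD 0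
    -- for sb in p2: if sb > b1 and not b2: b2 = sb     (b2 starts at 0; 'not b2' ⇔ b2 == 0)
    let b2 : Int := p2.foldl (fun b2 sb => if sb > b1 ∧ b2 = 0 then sb else b2) 0
    -- if not b2: b2 = p2[0]  (IndexError when p2 = []; excluded by Pre_)
    let b2 : Int := if b2 = 0 then (PySem.List.pyGet? p2 0).getD 0 else b2
    let point : Int := if b1 > b2 then point + 1 else point
    -- p1.remove(b1); p2.remove(b2)  (both values are present whenever this line is reached)
    let p1' := (PySem.List.remove? p1 b1).getD p1
    let p2' := (PySem.List.remove? p2 b2).getD p2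
    playWarLoopA r p1' p2' point

def playWar (length : Int) (pl1 : List Int) (pl2 : List Int) : Int :=
  -- p1 = pl1[:]; p2 = pl2[:]; for rnd in range(0, length) performs length.toNat iterations
  playWarLoopA length.toNat pl1 pl2 0

-- ===== PORT B =====
-- tournament tree: leaf (some v) = remaining block of weight v, leaf none = removed block;
-- Python's tuple nodes (v,) / (mx, left, right) become this inductive.
inductive PTree where
  | leaf : Option Int → PTree
  | node : Option Int → PTree → PTree → PTree
deriving DecidableEq, Repr

def ptop : PTree → Option Int
  | .leaf v => v
  | .node m _ _ => m

-- _omax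
def omaxI : Option Int → Option Int → Option Int
  | none, b => b
  | some a, none => some a
  | some a, some b => if a ≥ b then some a else some b

-- _beats(m, w): m is not None and (w is None or m > w)
def obeats : Option Int → Option Int → Bool
  | none, _ => false
  | some _, none => true
  | some m, some w => decide (m > w)

-- _build(vals, lo, hi) over the sublist vals[lo:hi]; mid = (lo+hi)//2 splits it at half length
def pbuild : List Int → PTree
  | [] => .leaf none            -- Python never builds an empty range; harmless dummy
  | [v] => .leaf (some v)
  | v₁ :: v₂ :: vs =>
    let m := (v₁ :: v₂ :: vs).length / 2
    let l := pbuild ((v₁ :: v₂ :: vs).take m)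
    let r := pbuild ((v₁ :: v₂ :: vs).drop m)
    .node (omaxI (ptop l) (ptop r)) l r
termination_by l => l.length
decreasing_by
  · simp; omega
  · simp; omega

-- _pop(t, w)
def ppop : PTree → Option Int → Option Int × PTree
  | .leaf v, _ => (v, .leaf none)
  | .node _ l r, w =>
    if obeats (ptop l) w then
      let p := ppop l w
      (p.1, .node (omaxI (ptop p.2) (ptop r)) p.2 r)
    else
      let p := ppop r w
      (p.1, .node (omaxI (ptop l) (ptop p.2)) l p.2)

def altLoop (pl1 : List Int) : Nat → Nat → PTree → Int → Int
  | 0, _, _, point => point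
  | k + 1, rnd, t, point =>
    -- b1 = pl1[rnd]  (IndexError outside Pre_; return point there)
    match PySem.List.pyGet? pl1 (rnd : Int) with
    | none => point
    | some b1 =>
      let p := if obeats (ptop t) (some b1) then ppop t (some b1) else ppop t none
      match p.1 with
      | none => point        -- Python's 'b1 > None' raises; outside Pre_
      | some b2 => altLoop pl1 k (rnd + 1) p.2 (if b1 > b2 then point + 1 else point)

def playWar_alt (length : Int) (pl1 : List Int) (pl2 : List Int) : Int :=
  if length > 0 then altLoop pl1 length.toNat 0 (pbuild pl2) 0 else 0

-- ===== PRECONDITION & SPEC =====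
-- A raises IndexError (p1[0] / p2[0] on an emptied hand) when length exceeds a hand size; the
-- last clause excludes the degenerate-weights corner where player 2 holds a weight-0 block while
-- player 1 plays a negative-weight block, on which A's scan — encoding 'no block chosen yet' as
-- weight 0 — can never select the 0 block, so which block it picks there is an artefact of that
-- encoding (e.g. on (2, [-1, 5], [-2, 0]) A returns 2 and B returns 1).
def Pre_playWar (length : Int) (pl1 : List Int) (pl2 : List Int) : Prop :=
  length ≤ (pl1.length : Int) ∧ length ≤ (pl2.length : Int) ∧
    ((0 : Int) ∉ pl2 ∨ ∀ x ∈ pl1.take length.toNat, 0 ≤ x)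
instance (length : Int) (pl1 : List Int) (pl2 : List Int) : Decidable (Pre_playWar length pl1 pl2) := by unfold Pre_playWar; infer_instance

def pvWitness_playWar : Int × List Int × List Int := (2, [1, 3], [2, 4])

def Spec_playWar (length : Int) (pl1 : List Int) (pl2 : List Int) (out : Int) : Prop := out = playWar_alt length pl1 pl2
instance (length : Int) (pl1 : List Int) (pl2 : List Int) (out : Int) : Decidable (Spec_playWar length pl1 pl2 out) := by unfold Spec_playWar; infer_instance

-- ===== CLAIM (what is proved, stated in full; the proofs are below) =====
def Claim_equal_playWar : Prop := ∀ (length : Int) (pl1 : List Int) (pl2 : List Int), Dom_playWar length pl1 pl2 → Pre_playWar length pl1 pl2 → Spec_playWar length pl1 pl2 (playWar length pl1 pl2)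

-- ===== LEMMAS AND PROOFS =====

-- remaining weights of a tree, in position order
def tlist : PTree → List Int
  | .leaf none => []
  | .leaf (some v) => [v]
  | .node _ l r => tlist l ++ tlist r

-- every node's cache is the omaxI of its children's tops
def pwf : PTree → Prop
  | .leaf _ => True
  | .node m l r => m = omaxI (ptop l) (ptop r) ∧ pwf l ∧ pwf r

theorem obeats_omax (a b c : Option Int) :
    obeats (omaxI a b) c = (obeats a c || obeats b c) := by
  rcases a with _ | a <;> rcases b with _ | b <;> rcases c with _ | c <;>
    simp [omaxI, obeats] <;> split_ifs <;> simp <;> omega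

theorem top_any (t : PTree) (h : pwf t) (b : Option Int) :
    obeats (ptop t) b = (tlist t).any (fun x => obeats (some x) b) := by
  induction t with
  | leaf v => rcases v with _ | v <;> simp [ptop, tlist, obeats]
  | node m l r ihl ihr =>
    obtain ⟨hm, hl, hr⟩ := h
    rw [show ptop (.node m l r) = m from rfl, show tlist (.node m l r) = tlist l ++ tlist r from rfl,
      hm, obeats_omax, ihl hl, ihr hr, List.any_append]

theorem pbuild_spec : ∀ (n : Nat) (l : List Int), l.length ≤ n →
    tlist (pbuild l) = l ∧ pwf (pbuild l) := by
  intro n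
  induction n with
  | zero =>
    intro l hl
    have : l = [] := List.eq_nil_of_length_eq_zero (by omega)
    subst this
    rw [pbuild]
    exact ⟨rfl, trivial⟩
  | succ n ih =>
    intro l hl
    match l with
    | [] => rw [pbuild]; exact ⟨rfl, trivial⟩
    | [v] => rw [pbuild]; exact ⟨rfl, trivial⟩
    | v₁ :: v₂ :: vs =>
      rw [pbuild]
      simp only [List.length_cons] at hl
      have h1 := ih ((v₁ :: v₂ :: vs).take ((v₁ :: v₂ :: vs).length / 2))
        (by simp; omega)
      have h2 := ih ((v₁ :: v₂ :: vs).drop ((v₁ :: v₂ :: vs).length / 2))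
        (by simp; omega)
      refine ⟨?_, rfl, h1.2, h2.2⟩
      show tlist _ ++ tlist _ = _
      rw [h1.1, h2.1, List.take_append_drop]

-- list-level picking: leftmost element beating b, removed
def pickL (b : Option Int) : List Int → Option Int × List Int
  | [] => (none, [])
  | x :: xs =>
    if obeats (some x) b then (some x, xs)
    else ((pickL b xs).1, x :: (pickL b xs).2)

theorem pickL_append_left (b : Option Int) (l₁ l₂ : List Int)
    (h : l₁.any (fun x => obeats (some x) b) = true) :
    pickL b (l₁ ++ l₂) = ((pickL b l₁).1, (pickL b l₁).2 ++ l₂) := by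
  induction l₁ with
  | nil => simp at h
  | cons x xs ih =>
    simp only [List.any_cons, Bool.or_eq_true] at h
    by_cases hx : obeats (some x) b = true
    · simp [pickL, hx]
    · have := ih (h.resolve_left hx)
      simp [pickL, hx, this]

theorem pickL_append_right (b : Option Int) (l₁ l₂ : List Int)
    (h : l₁.any (fun x => obeats (some x) b) = false) :
    pickL b (l₁ ++ l₂) = ((pickL b l₂).1, l₁ ++ (pickL b l₂).2) := by
  induction l₁ with
  | nil => simp
  | cons x xs ih =>
    simp only [List.any_cons, Bool.or_eq_false_iff] at h
    simp [pickL, h.1, ih h.2]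

theorem pickL_some (b : Option Int) (l : List Int)
    (h : l.any (fun x => obeats (some x) b) = true) :
    ∃ v l', pickL b l = (some v, l') ∧ l'.length + 1 = l.length ∧ ∀ x ∈ l', x ∈ l := by
  induction l with
  | nil => simp at h
  | cons x xs ih =>
    by_cases hx : obeats (some x) b = true
    · exact ⟨x, xs, by simp [pickL, hx], rfl, fun y hy => List.mem_cons_of_mem x hy⟩
    · simp only [List.any_cons, Bool.or_eq_true] at h
      obtain ⟨v, l', hp, hlen, hsub⟩ := ih (h.resolve_left hx)
      refine ⟨v, x :: l', by simp [pickL, hx, hp], by simp [← hlen], ?_⟩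
      intro y hy
      rcases List.mem_cons.mp hy with rfl | hy
      · exact List.mem_cons_self
      · exact List.mem_cons_of_mem x (hsub y hy)

theorem ppop_spec (t : PTree) (b : Option Int) (h : pwf t)
    (hb : (tlist t).any (fun x => obeats (some x) b) = true) :
    (ppop t b).1 = (pickL b (tlist t)).1 ∧ tlist (ppop t b).2 = (pickL b (tlist t)).2 ∧
      pwf (ppop t b).2 := by
  induction t with
  | leaf v =>
    rcases v with _ | v
    · simp [tlist] at hb
    · have hv : obeats (some v) b = true := by simpa [tlist] using hb
      refine ⟨?_, ?_, trivial⟩ <;> simp [ppop, tlist, pickL, hv]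
  | node m l r ihl ihr =>
    obtain ⟨hm, hl, hr⟩ := h
    by_cases hL : obeats (ptop l) b = true
    · have hanyl : (tlist l).any (fun x => obeats (some x) b) = true := by
        rw [← top_any l hl]; exact hL
      obtain ⟨h1, h2, h3⟩ := ihl hl hanyl
      rw [show (tlist (.node m l r)) = tlist l ++ tlist r from rfl,
        pickL_append_left b _ _ hanyl]
      have hstep : ppop (.node m l r) b
          = ((ppop l b).1, .node (omaxI (ptop (ppop l b).2) (ptop r)) (ppop l b).2 r) := by
        simp [ppop, hL]
      rw [hstep]
      exact ⟨h1, by simp [tlist, h2], rfl, h3, hr⟩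
    · have hanyl : (tlist l).any (fun x => obeats (some x) b) = false := by
        rw [← top_any l hl]; simpa using hL
      have hanyr : (tlist r).any (fun x => obeats (some x) b) = true := by
        rw [show (tlist (.node m l r)) = tlist l ++ tlist r from rfl] at hb
        simp only [List.any_append, hanyl, Bool.false_or] at hb
        exact hb
      obtain ⟨h1, h2, h3⟩ := ihr hr hanyr
      rw [show (tlist (.node m l r)) = tlist l ++ tlist r from rfl,
        pickL_append_right b _ _ hanyl]
      have hstep : ppop (.node m l r) b
          = ((ppop r b).1, .node (omaxI (ptop l) (ptop (ppop r b).2)) l (ppop r b).2) := by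
        simp [ppop, hL]
      rw [hstep]
      exact ⟨h1, by simp [tlist, h2], rfl, hl, h3⟩

-- A's inner scan freezes once the accumulator is non-zero.
theorem foldA_freeze (b1 : Int) (p2 : List Int) (a : Int) (ha : a ≠ 0) :
    p2.foldl (fun b2 sb => if sb > b1 ∧ b2 = 0 then sb else b2) a = a := by
  induction p2 with
  | nil => rfl
  | cons h t ih =>
    simp only [List.foldl_cons]
    rw [if_neg (fun hc => ha hc.2), ih]

-- A's inner scan computes the first non-zero element greater than b1 (default 0).
theorem foldA_eq_find (b1 : Int) (p2 : List Int) :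
    p2.foldl (fun b2 sb => if sb > b1 ∧ b2 = 0 then sb else b2) 0
      = (p2.find? (fun x => x != 0 && decide (x > b1))).getD 0 := by
  induction p2 with
  | nil => rfl
  | cons h t ih =>
    simp only [List.foldl_cons, List.find?_cons]
    rcases eq_or_ne h 0 with h0 | h0
    · subst h0
      have hp : ((0 : Int) != 0 && decide ((0 : Int) > b1)) = false := by simp
      rw [hp]
      simp only [ite_self]
      exact ih
    · by_cases hgt : h > b1
      · have hp : (h != 0 && decide (h > b1)) = true := by simp [h0, hgt]
        rw [hp, if_pos (by simp [hgt]), foldA_freeze b1 t h h0]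
        rfl
      · have hp : (h != 0 && decide (h > b1)) = false := by simp [hgt]
        rw [hp, if_neg (by simp [hgt])]
        exact ih

theorem find?_agree {α : Type} (p q : α → Bool) :
    ∀ (l : List α), (∀ x ∈ l, p x = q x) → l.find? p = l.find? q := by
  intro l
  induction l with
  | nil => intro _; rfl
  | cons x xs ih =>
    intro h
    rw [List.find?_cons, List.find?_cons, h x List.mem_cons_self,
      ih (fun y hy => h y (List.mem_cons_of_mem x hy))]

-- when the first element beating b1 is v, A's value-based remove deletes exactly the
-- position pickL removes (an earlier copy of v would itself beat b1)
theorem pick_remove (b1 v : Int) :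
    ∀ (l : List Int), l.find? (fun x => decide (x > b1)) = some v →
      (pickL (some b1) l).1 = some v ∧
        PySem.List.remove? l v = some ((pickL (some b1) l).2) := by
  intro l
  induction l with
  | nil => intro h; simp at h
  | cons x xs ih =>
    intro h
    by_cases hx : decide (x > b1) = true
    · rw [List.find?_cons_of_pos (p := fun x => decide (x > b1)) hx] at h
      obtain rfl : x = v := by injection h
      have hox : obeats (some x) (some b1) = true := hx
      exact ⟨by simp [pickL, hox], by simp [pickL, hox]⟩
    · rw [List.find?_cons_of_neg (p := fun x => decide (x > b1)) (by simpa using hx)] at h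
      have hv : decide (v > b1) = true := List.find?_some (p := fun x => decide (x > b1)) h
      have hne : x ≠ v := fun he => hx (he ▸ hv)
      obtain ⟨h1, h2⟩ := ih h
      have hox : obeats (some x) (some b1) = false := Bool.eq_false_iff.mpr hx
      refine ⟨by simp [pickL, hox, h1], ?_⟩
      rw [PySem.List.remove?_cons_of_ne xs hne, h2]
      simp [pickL, hox]

-- main invariant: after rnd rounds A's hand 1 is pl1.drop rnd, the tree represents A's p2
theorem loops_eq (pl1 pl2 : List Int) (N : Nat)
    (hq : (0 : Int) ∉ pl2 ∨ ∀ x ∈ pl1.take N, 0 ≤ x) (hN : N ≤ pl1.length) :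
    ∀ (k rnd : Nat) (p2 : List Int) (t : PTree) (point : Int),
      rnd + k = N → k ≤ p2.length → (∀ x ∈ p2, x ∈ pl2) → tlist t = p2 → pwf t →
      playWarLoopA k (pl1.drop rnd) p2 point = altLoop pl1 k rnd t point := by
  intro k
  induction k with
  | zero => intro rnd p2 t point _ _ _ _ _; rfl
  | succ k ih =>
    intro rnd p2 t point hrk hkp hsub htl hwf
    have hrnd : rnd < pl1.length := by omega
    have hb1A : (PySem.List.pyGet? (pl1.drop rnd) 0).getD 0 = pl1[rnd] := by
      rw [List.drop_eq_getElem_cons hrnd, PySem.List.pyGet?_zero_cons]; rfl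
    have hb1B : PySem.List.pyGet? pl1 ((rnd : Nat) : Int) = some pl1[rnd] := by
      rw [PySem.List.pyGet?_natCast]; simp [hrnd]
    have hremP1 : (PySem.List.remove? (pl1.drop rnd) pl1[rnd]).getD (pl1.drop rnd)
        = pl1.drop (rnd + 1) := by
      rw [List.drop_eq_getElem_cons hrnd, PySem.List.remove?_cons_self]; rfl
    -- on p2 the quirky predicate agrees with 'beats b1'
    have hz : ∀ x ∈ p2, x > pl1[rnd] → x ≠ 0 := by
      rcases hq with h0 | hpos
      · exact fun x hx _ he => h0 (he ▸ hsub x hx)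
      · intro x hx hgt
        have hb1 : 0 ≤ pl1[rnd] := by
          refine hpos pl1[rnd] ?_
          have : (pl1.take N)[rnd]'(by simp; omega) = pl1[rnd] := List.getElem_take
          exact this ▸ List.getElem_mem _
        omega
    have hfind : p2.find? (fun x => x != 0 && decide (x > pl1[rnd]))
        = p2.find? (fun x => decide (x > pl1[rnd])) := by
      refine find?_agree _ _ p2 (fun x hx => ?_)
      by_cases hgt : x > pl1[rnd]
      · simp [hgt, hz x hx hgt]
      · simp [hgt]
    have hBtop : obeats (ptop t) (some pl1[rnd])
        = p2.any (fun x => obeats (some x) (some pl1[rnd])) := htl ▸ top_any t hwf _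
    simp only [playWarLoopA, altLoop, hb1A, hb1B, foldA_eq_find, hfind, hremP1]
    by_cases hany : p2.any (fun x => obeats (some x) (some pl1[rnd])) = true
    · -- some remaining block beats b1
      have hanyd : p2.any (fun x => decide (x > pl1[rnd])) = true := by
        simpa [obeats] using hany
      obtain ⟨v, hvmem, hvp⟩ := List.any_eq_true.mp hanyd
      obtain ⟨w, hw⟩ := Option.isSome_iff_exists.mp
        ((List.find?_isSome (p := fun x => decide (x > pl1[rnd]))).mpr ⟨v, hvmem, hvp⟩)
      have hw0 : w ≠ 0 := by
        have : decide (w > pl1[rnd]) = true :=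
          List.find?_some (p := fun x => decide (x > pl1[rnd])) hw
        exact hz w (List.mem_of_find?_eq_some hw) (by simpa using this)
      obtain ⟨hp1, hp2⟩ := pick_remove pl1[rnd] w p2 hw
      obtain ⟨v', l', hpk, hlen, hsub'⟩ := pickL_some (some pl1[rnd]) p2 hany
      rw [hpk] at hp1 hp2
      obtain ⟨hq1, hq2, hq3⟩ := ppop_spec t (some pl1[rnd]) hwf (htl ▸ hany)
      rw [htl, hpk] at hq1 hq2
      simp only [hw, Option.getD_some, if_neg hw0, hp2, Option.getD_some,
        if_pos (hBtop.trans hany), hq1]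
      cases hp1
      exact ih (rnd + 1) l' _ _ (by omega) (by omega)
        (fun x hx => hsub x (hsub' x hx)) hq2 hq3
    · -- nothing beats b1: A falls back to p2[0], B pops the leftmost block
      have hanyd : p2.find? (fun x => decide (x > pl1[rnd])) = none := by
        rw [List.find?_eq_none]
        intro x hx
        have := List.any_eq_false.mp (Bool.eq_false_iff.mpr hany) x hx
        simpa [obeats] using this
      obtain ⟨h0, tl, rfl⟩ : ∃ h0 tl, p2 = h0 :: tl := by
        cases p2 with
        | nil => simp at hkp
        | cons a b => exact ⟨a, b, rfl⟩
      have hanyn : (h0 :: tl).any (fun x => obeats (some x) none) = true := by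
        simp [obeats]
      obtain ⟨hq1, hq2, hq3⟩ := ppop_spec t none hwf (htl ▸ hanyn)
      rw [htl] at hq1 hq2
      have hpknone : pickL none (h0 :: tl) = (some h0, tl) := by simp [pickL, obeats]
      rw [hpknone] at hq1 hq2
      have hBfalse : obeats (ptop t) (some pl1[rnd]) = false := by
        rw [hBtop]; exact Bool.eq_false_iff.mpr hany
      rw [hanyd]
      simp only [Option.getD_none, PySem.List.pyGet?_zero_cons, Option.getD_some,
        hBfalse, Bool.false_eq_true, if_false, hq1]
      simp only [PySem.List.remove?_cons_self, Option.getD_some, if_pos trivial]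
      exact ih (rnd + 1) tl _ _ (by omega) (by simpa using hkp)
        (fun x hx => hsub x (List.mem_cons_of_mem h0 hx)) hq2 hq3

-- ===== VERDICT (by name: the statement is the Claim_ definition above) =====
theorem playWar_spec : Claim_equal_playWar := by
  intro length pl1 pl2 _ hpre
  obtain ⟨h1, h2, hq⟩ := hpre
  unfold Spec_playWar playWar playWar_alt
  by_cases hpos : length > 0
  · rw [if_pos hpos]
    have := loops_eq pl1 pl2 length.toNat hq (by omega) length.toNat 0 pl2
      (pbuild pl2) 0 (by omega) (by omega) (fun x hx => hx) (pbuild_spec pl2.length pl2 le_rfl).1 (pbuild_spec pl2.length pl2 le_rfl).2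
    simpa using this
  · rw [if_neg hpos]
    have : length.toNat = 0 := by omega
    rw [this]; rfl
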